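-- pv_equiv track=rewrite | github.com/chicoden/MathAdventures | ReverseGOL/gen_cnf.py | simplify_maxterms
-- ===== SOURCE A (Python) =====
-- def simplify_maxterms(maxterms, fixed_vars):
--     new_maxterms = []
--     for maxterm in maxterms:
--         if any(fixed_vars[index] != negate for index, negate in maxterm if fixed_vars[index] != -1):
--             continue
--
--         new_maxterm = [(index, negate) for index, negate in maxterm if fixed_vars[index] == -1]
--         if len(new_maxterm) > 0:
--             new_maxterms.append(new_maxterm)
--
--     return new_maxterms
-- ===== SOURCE B (Python) =====
-- def simplify_maxterms(maxterms, fixed_vars):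
--     def residual(lits):
--         # None if a fixed literal satisfies the clause (stops there, like any()'s
--         # short circuit), else the residual literals on unassigned variables.
--         if not lits:
--             return []
--         (index, negate), rest = lits[0], lits[1:]
--         value = fixed_vars[index]
--         if value != -1 and value != negate:
--             return None
--         tail = residual(rest)
--         if tail is None:
--             return None
--         return [(index, negate)] + tail if value == -1 else tail
--
--     return [r for r in map(residual, maxterms) if r]
-- ===== Notes on version B (the rewrite author's own statement) =====
-- stated objective: alternative
-- what changed: B replaces A's two passes per clause (an any() satisfaction scan plus a separate filtering comprehension) with one recursive three-valued clause evaluator returning None (satisfied) or the residual literal list, and assembles the result by filtering map(residual, maxterms).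
import Mathlib
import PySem

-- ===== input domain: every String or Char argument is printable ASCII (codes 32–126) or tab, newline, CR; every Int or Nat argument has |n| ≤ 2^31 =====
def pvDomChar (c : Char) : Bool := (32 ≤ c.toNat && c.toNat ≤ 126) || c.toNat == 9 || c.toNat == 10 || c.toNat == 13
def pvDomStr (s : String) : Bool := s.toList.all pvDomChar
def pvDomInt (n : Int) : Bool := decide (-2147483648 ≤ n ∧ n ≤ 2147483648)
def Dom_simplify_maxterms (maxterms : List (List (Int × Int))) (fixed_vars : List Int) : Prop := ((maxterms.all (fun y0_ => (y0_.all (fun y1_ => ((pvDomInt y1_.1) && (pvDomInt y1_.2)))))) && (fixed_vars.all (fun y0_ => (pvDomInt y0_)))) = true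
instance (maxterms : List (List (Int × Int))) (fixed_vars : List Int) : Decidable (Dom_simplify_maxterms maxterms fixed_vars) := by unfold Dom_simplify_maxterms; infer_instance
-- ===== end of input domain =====

-- B replaces A's two passes per clause (any() scan + filtering comprehension) by one
-- recursive three-valued clause evaluator (objective: alternative decomposition).

-- ===== PORT A =====
-- fixed_vars[index] with Python indexing; .getD 0 is never reached under Pre_ (there Python raises IndexError)
def pvFV (fixed_vars : List Int) (i : Int) : Int := (PySem.List.pyGet? fixed_vars i).getD 0

def simplify_maxterms (maxterms : List (List (Int × Int))) (fixed_vars : List Int) : List (List (Int × Int)) :=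
  maxterms.foldl (fun new_maxterms maxterm =>
    if maxterm.any (fun p => pvFV fixed_vars p.1 ≠ -1 && pvFV fixed_vars p.1 ≠ p.2) then
      new_maxterms
    else
      let new_maxterm := maxterm.filter (fun p => pvFV fixed_vars p.1 == -1)
      if new_maxterm.length > 0 then new_maxterms ++ [new_maxterm] else new_maxterms) []

-- ===== PORT B =====
-- residual(lits): none = clause satisfied (evaluation stopped there), some tail = residual literals
def pvResidual (fixed_vars : List Int) : List (Int × Int) → Option (List (Int × Int))
  | [] => some []
  | p :: rest =>
    let value := pvFV fixed_vars p.1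
    if value ≠ -1 ∧ value ≠ p.2 then none
    else
      match pvResidual fixed_vars rest with
      | none => none
      | some tail => some (if value = -1 then p :: tail else tail)

-- [r for r in map(residual, maxterms) if r]  (keeps r that is neither None nor [])
def simplify_maxterms_alt (maxterms : List (List (Int × Int))) (fixed_vars : List Int) : List (List (Int × Int)) :=
  (maxterms.map (pvResidual fixed_vars)).filterMap (fun r =>
    match r with
    | some (x :: xs) => some (x :: xs)
    | _ => none)

-- ===== PRECONDITION & SPEC =====
-- Pre_ excludes exactly the inputs where Python A raises IndexError: some maxterm reaches a
-- literal whose index is out of range before any earlier literal satisfies the clause.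
def Pre_simplify_maxterms (maxterms : List (List (Int × Int))) (fixed_vars : List Int) : Prop :=
  ∀ m ∈ maxterms, ∀ k, k < m.length →
    (∀ j, j < k →
      (PySem.List.pyGet? fixed_vars (m.getD j (0, 0)).1).isSome ∧
      (pvFV fixed_vars (m.getD j (0, 0)).1 = -1 ∨ pvFV fixed_vars (m.getD j (0, 0)).1 = (m.getD j (0, 0)).2)) →
    (PySem.List.pyGet? fixed_vars (m.getD k (0, 0)).1).isSome

instance (maxterms : List (List (Int × Int))) (fixed_vars : List Int) : Decidable (Pre_simplify_maxterms maxterms fixed_vars) := by unfold Pre_simplify_maxterms; infer_instance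

def pvWitness_simplify_maxterms : (List (List (Int × Int))) × List Int := ([[(0, 0)], [(0, 1), (1, 0)]], [-1, 0])

def Spec_simplify_maxterms (maxterms : List (List (Int × Int))) (fixed_vars : List Int) (out : List (List (Int × Int))) : Prop := out = simplify_maxterms_alt maxterms fixed_vars
instance (maxterms : List (List (Int × Int))) (fixed_vars : List Int) (out : List (List (Int × Int))) : Decidable (Spec_simplify_maxterms maxterms fixed_vars out) := by unfold Spec_simplify_maxterms; infer_instance

-- ===== CLAIM =====
def Claim_equal_simplify_maxterms : Prop := ∀ (maxterms : List (List (Int × Int))) (fixed_vars : List Int), Dom_simplify_maxterms maxterms fixed_vars → Pre_simplify_maxterms maxterms fixed_vars → Spec_simplify_maxterms maxterms fixed_vars (simplify_maxterms maxterms fixed_vars)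

-- ===== LEMMAS AND PROOFS =====

-- B's recursive evaluator computes A's two passes: none iff some fixed literal satisfies,
-- otherwise the literals on unassigned variables.
theorem pvResidual_eq (fixed_vars : List Int) (m : List (Int × Int)) :
    pvResidual fixed_vars m =
      if m.any (fun p => pvFV fixed_vars p.1 ≠ -1 && pvFV fixed_vars p.1 ≠ p.2) then none
      else some (m.filter (fun p => pvFV fixed_vars p.1 == -1)) := by
  induction m with
  | nil => simp [pvResidual]
  | cons p rest ih =>
    by_cases h1 : pvFV fixed_vars p.1 = -1
    · have hs : pvResidual fixed_vars (p :: rest) =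
          match pvResidual fixed_vars rest with
          | none => none
          | some tail => some (p :: tail) := by
        simp [pvResidual, h1]
      rw [hs, ih]
      by_cases hr : (rest.any fun q => pvFV fixed_vars q.1 ≠ -1 && pvFV fixed_vars q.1 ≠ q.2) = true
      · have hc : ((p :: rest).any fun q => pvFV fixed_vars q.1 ≠ -1 && pvFV fixed_vars q.1 ≠ q.2) = true := by
          simp only [List.any_cons, hr, Bool.or_true]
        rw [if_pos hr, if_pos hc]
      · simp only [Bool.not_eq_true] at hr
        have hc : ((p :: rest).any fun q => pvFV fixed_vars q.1 ≠ -1 && pvFV fixed_vars q.1 ≠ q.2) = false := by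
          simp only [List.any_cons, hr, Bool.or_false, Bool.and_eq_false_iff, decide_eq_false_iff_not]
          left; simp [h1]
        rw [if_neg (fun h => Bool.false_ne_true (hr ▸ h)), hc]
        simp [h1]
    · by_cases h2 : pvFV fixed_vars p.1 = p.2
      · have h3 : p.2 ≠ -1 := h2 ▸ h1
        have hs : pvResidual fixed_vars (p :: rest) =
            match pvResidual fixed_vars rest with
            | none => none
            | some tail => some tail := by
          simp [pvResidual, h2, h3]
        rw [hs, ih]
        by_cases hr : (rest.any fun q => pvFV fixed_vars q.1 ≠ -1 && pvFV fixed_vars q.1 ≠ q.2) = true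
        · have hc : ((p :: rest).any fun q => pvFV fixed_vars q.1 ≠ -1 && pvFV fixed_vars q.1 ≠ q.2) = true := by
            simp only [List.any_cons, hr, Bool.or_true]
          rw [if_pos hr, if_pos hc]
        · simp only [Bool.not_eq_true] at hr
          have hc : ((p :: rest).any fun q => pvFV fixed_vars q.1 ≠ -1 && pvFV fixed_vars q.1 ≠ q.2) = false := by
            simp only [List.any_cons, hr, Bool.or_false, Bool.and_eq_false_iff, decide_eq_false_iff_not]
            right; simp [h2]
          rw [if_neg (fun h => Bool.false_ne_true (hr ▸ h)), hc]
          simp [h1]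
      · have hs : pvResidual fixed_vars (p :: rest) = none := by
          simp [pvResidual, h1, h2]
        rw [hs]
        simp [List.any_cons, h1, h2]

-- A's loop from any accumulator equals acc ++ B's filterMap assembly.
theorem foldl_eq_acc (fixed_vars : List Int) (maxterms : List (List (Int × Int))) (acc : List (List (Int × Int))) :
    maxterms.foldl (fun new_maxterms maxterm =>
      if maxterm.any (fun p => pvFV fixed_vars p.1 ≠ -1 && pvFV fixed_vars p.1 ≠ p.2) then
        new_maxterms
      else
        let new_maxterm := maxterm.filter (fun p => pvFV fixed_vars p.1 == -1)
        if new_maxterm.length > 0 then new_maxterms ++ [new_maxterm] else new_maxterms) acc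
    = acc ++ simplify_maxterms_alt maxterms fixed_vars := by
  induction maxterms generalizing acc with
  | nil => simp [simplify_maxterms_alt]
  | cons m rest ih =>
    simp only [List.foldl_cons]
    by_cases h : (m.any fun p => pvFV fixed_vars p.1 ≠ -1 && pvFV fixed_vars p.1 ≠ p.2) = true
    · rw [if_pos h, ih]
      have hres : pvResidual fixed_vars m = none := by rw [pvResidual_eq, if_pos h]
      simp [simplify_maxterms_alt, hres]
    · rw [if_neg h]
      have hres : pvResidual fixed_vars m = some (m.filter (fun p => pvFV fixed_vars p.1 == -1)) := by
        rw [pvResidual_eq, if_neg h]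
      cases hf : m.filter (fun p => pvFV fixed_vars p.1 == -1) with
      | nil =>
        simp only [List.length_nil, gt_iff_lt, lt_self_iff_false, if_false]
        rw [ih]
        simp [simplify_maxterms_alt, hres, hf]
      | cons a l =>
        simp only [List.length_cons, Nat.zero_lt_succ, gt_iff_lt, if_pos]
        rw [ih]
        simp [simplify_maxterms_alt, hres, hf, List.append_assoc]

theorem simplify_maxterms_spec : Claim_equal_simplify_maxterms := by
  intro maxterms fixed_vars _ _
  show simplify_maxterms maxterms fixed_vars = simplify_maxterms_alt maxterms fixed_vars
  unfold simplify_maxterms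
  simpa using foldl_eq_acc fixed_vars maxterms []
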